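-- pv_equiv track=rewrite | github.com/ShresthSamyak/hacklipse | narrative_merge_engine/app/services/grounding_validation_service.py | _find_best_window
-- ===== SOURCE A (Python) =====
-- def _find_best_window(
--     query: str, testimony: str, overlap_tokens: set[str]
-- ) -> str:
--     """Find the best matching window in the testimony for a set of overlap tokens."""
--     if not overlap_tokens:
--         return ""
--
--     words = testimony.split()
--     best_start = 0
--     best_count = 0
--     window_size = min(len(query.split()) + 5, len(words))
--
--     for start in range(max(1, len(words) - window_size + 1)):
--         window = " ".join(words[start:start + window_size]).lower()
--         count = sum(1 for t in overlap_tokens if t in window)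
--         if count > best_count:
--             best_count = count
--             best_start = start
--
--     span = " ".join(words[best_start:best_start + window_size])
--     return span.strip()
-- ===== SOURCE B (Python) =====
-- def _find_best_window(
--     query: str, testimony: str, overlap_tokens: set[str]
-- ) -> str:
--     """Occurrence-based rewrite: collect every char position where each token occurs in
--     the full lowered testimony (one str.find sweep per token), precompute word-start char
--     offsets, and score each word window by binary-searching the sorted occurrence lists
--     -- no window strings are ever built."""
--     if not overlap_tokens:
--         return ""
--     words = testimony.split()
--     window_size = min(len(query.split()) + 5, len(words))
--     n = max(1, len(words) - window_size + 1)
--     full = " ".join(words).lower()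
--     # pos[i] = char offset where word i starts in `full`
--     pos = [0]
--     total = 0
--     for w in words:
--         total += len(w) + 1
--         pos.append(total)
--     # (sorted occurrence char positions, token length) for every token
--     items = []
--     for t in overlap_tokens:
--         ps = []
--         p = full.find(t, 0)
--         while p != -1:
--             ps.append(p)
--             p = full.find(t, p + 1)
--         items.append((ps, len(t)))
--     best_start = 0
--     best_count = 0
--     for s in range(n):
--         lo = pos[s]
--         hi = pos[s + window_size] - 1 if window_size else lo
--         count = 0
--         for ps, L in items:
--             # binary search: first occurrence at or after lo
--             i, j = 0, len(ps)
--             while i < j: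
--                 mid = (i + j) // 2
--                 if ps[mid] < lo:
--                     i = mid + 1
--                 else:
--                     j = mid
--             if i < len(ps) and ps[i] + L <= hi:
--                 count += 1
--         if count > best_count:
--             best_count = count
--             best_start = s
--     return " ".join(words[best_start:best_start + window_size]).strip()
-- ===== Notes on version B (the rewrite author's own statement) =====
-- stated objective: alternative
-- what changed: A rebuilds every sliding-window string and substring-scans each token in it per window; B never builds window strings: it lowercases the joined testimony once, collects each token's occurrence char positions with a str.find sweep, precomputes word-start char offsets, and decides each (window, token) match by binary-searching the sorted occurrence list against the window's char span.
import Mathlib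
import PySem

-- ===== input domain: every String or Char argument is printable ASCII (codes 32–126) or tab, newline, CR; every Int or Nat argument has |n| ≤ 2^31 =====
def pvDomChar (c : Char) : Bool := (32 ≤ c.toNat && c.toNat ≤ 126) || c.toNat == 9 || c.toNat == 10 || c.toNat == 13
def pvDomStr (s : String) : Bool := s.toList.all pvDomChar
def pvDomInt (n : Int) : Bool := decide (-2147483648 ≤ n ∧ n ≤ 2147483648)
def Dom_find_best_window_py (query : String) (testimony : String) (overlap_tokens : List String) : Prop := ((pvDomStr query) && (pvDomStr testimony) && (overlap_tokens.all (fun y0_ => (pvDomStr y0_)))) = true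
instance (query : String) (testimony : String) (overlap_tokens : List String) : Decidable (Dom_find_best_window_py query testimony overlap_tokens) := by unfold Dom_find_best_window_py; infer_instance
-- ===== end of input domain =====

-- B replaces A's per-window substring scans by one str.find sweep per token over the full
-- lowered testimony plus word-offset arithmetic and binary search (objective: alternative).

-- ===== PORT A =====
def find_best_window_py (query : String) (testimony : String) (overlap_tokens : List String) : String :=
  if overlap_tokens.isEmpty then "" else
  let words := PySem.Str.split₀ testimony
  let window_size : Int := min ((PySem.Str.split₀ query).length + 5) (words.length : Int)
  let st := (PySem.List.pyRange 0 (max 1 ((words.length : Int) - window_size + 1)) 1).foldl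
    (fun (st : Int × Int) start =>
      let window := PySem.Str.lower (PySem.Str.join " " (PySem.List.slice words (some start) (some (start + window_size))))
      let count : Int := (overlap_tokens.map (fun t => if PySem.Str.isIn t window then (1 : Int) else 0)).sum
      if count > st.2 then (start, count) else st)
    ((0 : Int), (0 : Int))
  PySem.Str.strip (PySem.Str.join " " (PySem.List.slice words (some st.1) (some (st.1 + window_size))))

-- ===== PORT B =====
-- `_first_at_least`'s while-loop (binary search); recursion on the shrinking gap hi - lo
def pyFirstAtLeastAux (a : List Int) (x : Int) (lo hi : Int) : Int :=
  if h : lo < hi then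
    let mid := PySem.Int.floordiv (lo + hi) 2
    if PySem.List.pyGetD a mid 0 < x then pyFirstAtLeastAux a x (mid + 1) hi
    else pyFirstAtLeastAux a x lo mid
  else lo
termination_by (hi - lo).toNat
decreasing_by
  · have hb := PySem.Int.floordiv_two_mid_bounds  (le_of_lt h)
    omega
  · have h2 : PySem.Int.floordiv (lo + hi) 2 < hi :=
      (PySem.Int.floordiv_lt_iff_lt_mul (by norm_num)).mpr (by omega)
    omega

def pyFirstAtLeast (a : List Int) (x : Int) : Int :=
  pyFirstAtLeastAux a x 0 (PySem.List.len a)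


-- a successful find result lies between the search start and len (used for termination)
theorem pyFindFrom_bounds (full t : String) (k : Nat)
    (h : PySem.Str.findFrom full t (k : Int) none ≠ -1) :
    (k : Int) ≤ PySem.Str.findFrom full t (k : Int) none ∧
      PySem.Str.findFrom full t (k : Int) none ≤ (full.toList.length : Int) := by
  simp only [PySem.Str.findFrom_eq] at *
  by_cases hk : k ≤ full.toList.length
  · rw [PySem.Chars.findFrom_natCast full.toList t.toList k hk] at h ⊢
    by_cases hf : PySem.Chars.find (full.toList.drop k) t.toList = -1
    · rw [if_pos hf] at h; exact absurd rfl h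
    · rw [if_neg hf] at h ⊢
      have h1 := PySem.Chars.neg_one_le_find (full.toList.drop k) t.toList
      have h2 := PySem.Chars.find_le_length (full.toList.drop k) t.toList
      rw [List.length_drop] at h2
      have h3 : ((full.toList.length - k : Nat) : Int) = full.toList.length - k := by omega
      rw [h3] at h2
      omega
  · exfalso
    apply h
    simp only [PySem.Chars.findFrom]
    rw [if_pos (by omega)]

-- the `while p != -1` occurrence-collecting loop of B, starting the search at k
def pyOccLoop (full t : String) (k : Nat) : List Int :=
  let p := PySem.Str.findFrom full t (k : Int) none
  if h : p = -1 then [] else p :: pyOccLoop full t (p.toNat + 1)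
termination_by full.toList.length + 1 - k
decreasing_by
  have hb := pyFindFrom_bounds full t k h
  omega

def find_best_window_py_alt (query : String) (testimony : String) (overlap_tokens : List String) : String :=
  if overlap_tokens.isEmpty then "" else
  let words := PySem.Str.split₀ testimony
  let window_size : Int := min ((PySem.Str.split₀ query).length + 5) (words.length : Int)
  let n : Int := max 1 ((words.length : Int) - window_size + 1)
  let full := PySem.Str.lower (PySem.Str.join " " words)
  let pos : List Int := (words.foldl
    (fun (st : List Int × Int) w =>
      (st.1 ++ [st.2 + PySem.Str.len w + 1], st.2 + PySem.Str.len w + 1)) ([0], 0)).1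
  let items : List (List Int × Int) := overlap_tokens.foldl
    (fun acc t => acc ++ [(pyOccLoop full t 0, PySem.Str.len t)]) []
  let st := (PySem.List.pyRange 0 n 1).foldl
    (fun (st : Int × Int) s =>
      let lo := PySem.List.pyGetD pos s 0
      let hi := if window_size ≠ 0 then PySem.List.pyGetD pos (s + window_size) 0 - 1 else lo
      let count : Int := items.foldl
        (fun (c : Int) pr =>
          let j := pyFirstAtLeast pr.1 lo
          if j < PySem.List.len pr.1 ∧ PySem.List.pyGetD pr.1 j 0 + pr.2 ≤ hi
          then c + 1 else c) 0
      if count > st.2 then (s, count) else st)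
    ((0 : Int), (0 : Int))
  PySem.Str.strip (PySem.Str.join " " (PySem.List.slice words (some st.1) (some (st.1 + window_size))))

-- ===== PRECONDITION & SPEC =====
def Spec_find_best_window_py (query : String) (testimony : String) (overlap_tokens : List String) (out : String) : Prop := out = find_best_window_py_alt query testimony overlap_tokens
instance (query : String) (testimony : String) (overlap_tokens : List String) (out : String) : Decidable (Spec_find_best_window_py query testimony overlap_tokens out) := by unfold Spec_find_best_window_py; infer_instance

-- ===== CLAIM (what is proved, stated in full; the proofs are below) =====
def Claim_equal_find_best_window_py : Prop := ∀ (query : String) (testimony : String) (overlap_tokens : List String), Dom_find_best_window_py query testimony overlap_tokens → Spec_find_best_window_py query testimony overlap_tokens (find_best_window_py query testimony overlap_tokens)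

-- ===== LEMMAS AND PROOFS =====

-- char offset of word i in the space-joined list (proof-side abstraction)
def pvPos (ws : List (List Char)) (i : Nat) : Nat :=
  ((ws.take i).map (fun w => w.length + 1)).sum

theorem pvPos_cons (w : List Char) (ws : List (List Char)) (i : Nat) :
    pvPos (w :: ws) (i + 1) = w.length + 1 + pvPos ws i := by
  simp [pvPos, List.take_succ_cons]

theorem le_pvPos' (ws : List (List Char)) (i : Nat) : i ≤ ws.length → i ≤ pvPos ws i := by
  induction ws generalizing i with
  | nil => intro h; simp at h; subst h; simp [pvPos]
  | cons w rest ih =>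
    intro h
    cases i with
    | zero => simp
    | succ j => rw [pvPos_cons]; have := ih j (by simp at h; omega); omega

theorem pvSum_ge_length (l : List (List Char)) :
    l.length ≤ (l.map (fun w => w.length + 1)).sum := by
  induction l with
  | nil => simp
  | cons w rest ih => simp; omega

theorem pvPos_add (ws : List (List Char)) (i k : Nat) :
    pvPos ws (i + k) = pvPos ws i + (((ws.drop i).take k).map (fun w => w.length + 1)).sum := by
  simp [pvPos, List.take_add]

theorem pvPos_mono (ws : List (List Char)) {i j : Nat} (h : i ≤ j) : pvPos ws i ≤ pvPos ws j := by
  have := pvPos_add ws i (j - i)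
  rw [Nat.add_sub_cancel' h] at this
  omega

theorem pvPos_lt_add (ws : List (List Char)) (s W : Nat) (h1 : 1 ≤ W) (h2 : s + W ≤ ws.length) :
    pvPos ws s + W ≤ pvPos ws (s + W) := by
  have ha := pvPos_add ws s W
  have hb := pvSum_ge_length ((ws.drop s).take W)
  have hc : ((ws.drop s).take W).length = W := by
    rw [List.length_take, List.length_drop]; omega
  omega

theorem pvJoin_length (ws : List (List Char)) (h : ws ≠ []) :
    (PySem.Chars.join [' '] ws).length = pvPos ws ws.length - 1 := by
  induction ws with
  | nil => simp at h
  | cons w rest ih =>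
    cases rest with
    | nil => simp [PySem.Chars.join_singleton, pvPos]
    | cons b r =>
      rw [PySem.Chars.join_cons_cons]
      have hlen := ih (by simp)
      have h1 := le_pvPos' (b :: r) (b :: r).length le_rfl
      rw [show (w :: b :: r).length = (b :: r).length + 1 from rfl,
          pvPos_cons w (b :: r) (b :: r).length]
      simp only [List.length_append, hlen]
      simp only [List.length_cons, List.length_nil] at *
      omega

theorem pvJoin_take (ws : List (List Char)) (W : Nat) (h1 : 1 ≤ W) (h2 : W ≤ ws.length) :
    PySem.Chars.join [' '] (ws.take W) = (PySem.Chars.join [' '] ws).take (pvPos ws W - 1) := by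
  induction W generalizing ws with
  | zero => omega
  | succ V ih =>
    cases ws with
    | nil => simp at h2
    | cons w rest =>
      cases V with
      | zero =>
        simp only [List.take_succ_cons, List.take_zero, PySem.Chars.join_singleton]
        rw [pvPos_cons w rest 0]
        simp only [pvPos, List.take_zero, List.map_nil, List.sum_nil, Nat.add_zero,
          Nat.add_sub_cancel]
        cases rest with
        | nil => simp [PySem.Chars.join_singleton]
        | cons b r =>
          rw [PySem.Chars.join_cons_cons]
          rw [show w ++ [' '] ++ PySem.Chars.join [' '] (b :: r)
                = w ++ ([' '] ++ PySem.Chars.join [' '] (b :: r)) by simp]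
          rw [List.take_append_of_le_length (by simp)]
          simp
      | succ U =>
        have hrest : U + 1 ≤ rest.length := by simp at h2; omega
        obtain ⟨b, r, rfl⟩ : ∃ b r, rest = b :: r :=
          List.exists_cons_of_ne_nil (by rintro rfl; simp at hrest)
        obtain ⟨c, q, hcq⟩ : ∃ c q, (b :: r).take (U + 1) = c :: q := by
          cases htk : (b :: r).take (U + 1)
          · simp at htk
          · exact ⟨_, _, rfl⟩
        rw [List.take_succ_cons, hcq, PySem.Chars.join_cons_cons, ← hcq]
        rw [ih (b :: r) (by omega) hrest]
        rw [PySem.Chars.join_cons_cons]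
        rw [pvPos_cons w (b :: r) (U + 1)]
        have hp := le_pvPos' (b :: r) (U + 1) hrest
        rw [show w.length + 1 + pvPos (b :: r) (U + 1) - 1
              = (w ++ [' ']).length + (pvPos (b :: r) (U + 1) - 1) by simp; omega]
        rw [List.take_length_add_append]

theorem pvJoin_seg (ws : List (List Char)) (s W : Nat) (h1 : 1 ≤ W) (h2 : s + W ≤ ws.length) :
    PySem.Chars.join [' '] ((ws.drop s).take W)
      = ((PySem.Chars.join [' '] ws).drop (pvPos ws s)).take (pvPos ws (s + W) - 1 - pvPos ws s) := by
  induction s generalizing ws with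
  | zero =>
    simp only [List.drop_zero, Nat.zero_add]
    rw [pvJoin_take ws W h1 (by omega)]
    simp [pvPos]
  | succ s ih =>
    cases ws with
    | nil => simp at h2
    | cons w rest =>
      simp only [List.drop_succ_cons]
      rw [ih rest (by simp at h2; omega)]
      rw [show s + 1 + W = (s + W) + 1 by omega]
      rw [pvPos_cons w rest (s + W), pvPos_cons w rest s]
      obtain ⟨b, r, rfl⟩ : ∃ b r, rest = b :: r :=
        List.exists_cons_of_ne_nil (by rintro rfl; simp at h2; omega)
      rw [PySem.Chars.join_cons_cons]
      have hps := le_pvPos' (b :: r) s (by simp at h2 ⊢; omega)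
      have hmono : pvPos (b :: r) s ≤ pvPos (b :: r) (s + W) := pvPos_mono _ (by omega)
      rw [show w.length + 1 + pvPos (b :: r) s = (w ++ [' ']).length + pvPos (b :: r) s by simp]
      rw [show w ++ [' '] ++ PySem.Chars.join [' '] (b :: r)
            = (w ++ [' ']) ++ PySem.Chars.join [' '] (b :: r) by simp]
      rw [List.drop_length_add_append]
      have hp2 := le_pvPos' (b :: r) (s + W) (by simp at h2 ⊢; omega)
      simp only [List.length_append, List.length_cons, List.length_nil]
      congr 1
      omega

-- an infix of a segment is an occurrence inside the segment's bounds
theorem pvInfix_seg {α : Type} (l tl : List α) (a b : Nat) :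
    tl <:+: (l.drop a).take b ↔ ∃ p : Nat, a ≤ p ∧ p + tl.length ≤ a + b ∧ tl <+: l.drop p := by
  constructor
  · intro h
    obtain ⟨j, hj⟩ : ∃ j, tl <+: ((l.drop a).take b).drop j := by
      obtain ⟨s, t, hst⟩ := h
      exact ⟨s.length, by rw [← hst]; simp [List.prefix_append]⟩
    by_cases hjb : j ≤ b
    · rw [List.drop_take, List.drop_drop] at hj
      rw [List.prefix_take_iff] at hj
      exact ⟨a + j, by omega, by omega, hj.1⟩
    · have : ((l.drop a).take b).drop j = [] := by
        apply List.drop_eq_nil_of_le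
        simp [List.length_take]
        omega
      rw [this] at hj
      have : tl = [] := List.prefix_nil.mp hj
      exact ⟨a, le_rfl, by simp [this], by simp [this]⟩
  · rintro ⟨p, hap, hlen, hpre⟩
    have hdd : l.drop p = (l.drop a).drop (p - a) := by
      rw [List.drop_drop]; congr 1; omega
    have : tl <+: ((l.drop a).drop (p - a)).take (b - (p - a)) := by
      rw [List.prefix_take_iff]
      exact ⟨hdd ▸ hpre, by omega⟩
    rw [← List.drop_take] at this
    exact this.isInfix.trans (List.drop_suffix _ _).isInfix

theorem pvNoMatch_of_not_infix (cs tl : List Char) (k : Nat)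
    (h : ¬ tl <:+: cs.drop k) : ∀ p : Nat, k ≤ p → ¬ tl <+: cs.drop p := by
  intro p hkp hpre
  apply h
  have : cs.drop p = (cs.drop k).drop (p - k) := by rw [List.drop_drop]; congr 1; omega
  rw [this] at hpre
  exact hpre.isInfix.trans (List.drop_suffix _ _).isInfix

theorem pvOccLoop_eq_filter_aux (full t : String) (m : Nat) :
    ∀ k : Nat, full.toList.length + 1 - k ≤ m →
    pyOccLoop full t k
      = (PySem.List.pyRange (k : Int) ((full.toList.length : Int) - t.toList.length + 1) 1).filter
          (fun p => decide (t.toList <+: full.toList.drop p.toNat)) := by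
  induction m with
  | zero =>
    intro k hk
    rw [pyOccLoop]
    have hf : PySem.Str.findFrom full t (k : Int) none = -1 := by
      simp only [PySem.Str.findFrom_eq, PySem.Chars.findFrom]
      rw [if_pos (by omega)]
    rw [dif_pos hf]
    rw [PySem.List.pyRange_one_eq_nil (by omega)]
    simp
  | succ m ih =>
    intro k hk
    rw [pyOccLoop]
    by_cases hf : PySem.Str.findFrom full t (k : Int) none = -1
    · rw [dif_pos hf]
      by_cases hkl : k ≤ full.toList.length
      · have hni := (PySem.Chars.findFrom_natCast_eq_neg_one_iff full.toList t.toList k hkl).mp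
          (by simpa using hf)
        symm
        rw [List.filter_eq_nil_iff]
        intro p hp
        rw [PySem.List.mem_pyRange_one] at hp
        simp only [decide_eq_true_eq]
        apply pvNoMatch_of_not_infix full.toList t.toList k hni
        omega
      · symm
        rw [PySem.List.pyRange_one_eq_nil (by omega)]
        simp
    · rw [dif_neg hf]
      have hb := pyFindFrom_bounds full t k hf
      set p := PySem.Str.findFrom full t (k : Int) none with hp
      have hkl : k ≤ full.toList.length := by omega
      have hspec := PySem.Chars.findFrom_natCast_spec full.toList t.toList k hkl
        (by simpa using hf)
      simp only [← PySem.Str.findFrom_eq, ← hp] at hspec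
      obtain ⟨hkp, hmatch, hmin⟩ := hspec
      have hlenle : t.toList.length ≤ full.toList.length - p.toNat := by
        have h5 := hmatch.length_le
        rw [List.length_drop] at h5
        exact h5
      have hpB : p < (full.toList.length : Int) - t.toList.length + 1 := by omega
      rw [PySem.List.pyRange_one_append (k : Int) p ((full.toList.length : Int) - t.toList.length + 1) (by omega) (by omega)]
      rw [List.filter_append]
      have hfirst : (PySem.List.pyRange (k : Int) p 1).filter
          (fun q => decide (t.toList <+: full.toList.drop q.toNat)) = [] := by
        rw [List.filter_eq_nil_iff]
        intro q hq
        rw [PySem.List.mem_pyRange_one] at hq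
        simp only [decide_eq_true_eq]
        exact hmin q.toNat (by omega) (by omega)
      rw [hfirst, List.nil_append]
      rw [PySem.List.pyRange_one_cons (by omega)]
      rw [List.filter_cons, if_pos (by simpa using hmatch)]
      have h6 := ih (p.toNat + 1) (by omega)
      rw [show ((p.toNat + 1 : Nat) : Int) = p + 1 by omega] at h6
      rw [h6]

theorem pvOccLoop_eq_filter (full t : String) (k : Nat) :
    pyOccLoop full t k
      = (PySem.List.pyRange (k : Int) ((full.toList.length : Int) - t.toList.length + 1) 1).filter
          (fun p => decide (t.toList <+: full.toList.drop p.toNat)) :=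
  pvOccLoop_eq_filter_aux full t (full.toList.length + 1 - k) k le_rfl

theorem pvOcc_sorted (full t : String) : (pyOccLoop full t 0).Pairwise (· < ·) := by
  rw [pvOccLoop_eq_filter]
  exact List.Pairwise.sublist List.filter_sublist (PySem.List.pairwise_lt_pyRange_one _ _)

theorem pvOcc_mem (full t : String) (p : Int) :
    p ∈ pyOccLoop full t 0
      ↔ 0 ≤ p ∧ p + (t.toList.length : Int) ≤ (full.toList.length : Int)
          ∧ t.toList <+: full.toList.drop p.toNat := by
  rw [pvOccLoop_eq_filter, List.mem_filter, PySem.List.mem_pyRange_one]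
  simp only [decide_eq_true_eq]
  constructor
  · rintro ⟨⟨h0, h1⟩, h2⟩
    exact ⟨h0, by omega, h2⟩
  · rintro ⟨h0, h1, h2⟩
    exact ⟨⟨h0, by omega⟩, h2⟩

theorem pvFalAux_spec (a : List Int) (x : Int)
    (hs : ∀ i j : Nat, i ≤ j → j < a.length → a.getD i 0 ≤ a.getD j 0) :
    ∀ (m : Nat) (lo hi : Int), (hi - lo).toNat ≤ m → 0 ≤ lo → lo ≤ hi → hi ≤ (a.length : Int) →
    (∀ i : Nat, i < a.length → (((i : Int) < lo → a.getD i 0 < x) ∧ (hi ≤ (i : Int) → x ≤ a.getD i 0))) →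
    0 ≤ pyFirstAtLeastAux a x lo hi ∧ pyFirstAtLeastAux a x lo hi ≤ (a.length : Int) ∧
      (∀ i : Nat, i < a.length →
        (((i : Int) < pyFirstAtLeastAux a x lo hi → a.getD i 0 < x) ∧
         (pyFirstAtLeastAux a x lo hi ≤ (i : Int) → x ≤ a.getD i 0))) := by
  intro m
  induction m with
  | zero =>
    intro lo hi hm h0 h1 h2 hinv
    rw [pyFirstAtLeastAux, dif_neg (by omega)]
    exact ⟨h0, by omega, fun i hi' => ⟨(hinv i hi').1, fun h => (hinv i hi').2 (by omega)⟩⟩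
  | succ m ih =>
    intro lo hi hm h0 h1 h2 hinv
    rw [pyFirstAtLeastAux]
    by_cases hlt : lo < hi
    · rw [dif_pos hlt]
      have hb := PySem.Int.floordiv_two_mid_bounds (le_of_lt hlt)
      have hmidlt : PySem.Int.floordiv (lo + hi) 2 < hi :=
        (PySem.Int.floordiv_lt_iff_lt_mul (by norm_num)).mpr (by omega)
      set mid := PySem.Int.floordiv (lo + hi) 2 with hmid
      have hmidrange : 0 ≤ mid ∧ mid < (a.length : Int) := by omega
      have hgetd : PySem.List.pyGetD a mid 0 = a.getD mid.toNat 0 := by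
        rw [PySem.List.pyGetD_eq_getElem a 0 hmidrange.1 (by omega)]
        rw [List.getD_eq_getElem _ _ (by omega)]
      by_cases hcmp : PySem.List.pyGetD a mid 0 < x
      · rw [if_pos hcmp]
        apply ih (mid + 1) hi (by omega) (by omega) (by omega) h2
        intro i hi'
        refine ⟨fun hilt => ?_, fun hge => (hinv i hi').2 hge⟩
        have : a.getD i 0 ≤ a.getD mid.toNat 0 := hs i mid.toNat (by omega) (by omega)
        rw [hgetd] at hcmp
        omega
      · rw [if_neg hcmp]
        apply ih lo mid (by omega) h0 (by omega) (by omega)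
        intro i hi'
        refine ⟨fun hilt => (hinv i hi').1 hilt, fun hge => ?_⟩
        have : a.getD mid.toNat 0 ≤ a.getD i 0 := hs mid.toNat i (by omega) hi'
        rw [hgetd] at hcmp
        omega
    · rw [dif_neg hlt]
      exact ⟨h0, by omega, fun i hi' => ⟨(hinv i hi').1, fun h => (hinv i hi').2 (by omega)⟩⟩

-- presence test: first-element-≥-lo check decides existence of an occurrence in [lo, hi-L]
theorem pvPresence (ps : List Int) (lo hi L : Int)
    (hsorted : ps.Pairwise (· < ·)) :
    (pyFirstAtLeast ps lo < PySem.List.len ps ∧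
        PySem.List.pyGetD ps (pyFirstAtLeast ps lo) 0 + L ≤ hi)
      ↔ ∃ p ∈ ps, lo ≤ p ∧ p + L ≤ hi := by
  have hs : ∀ i j : Nat, i ≤ j → j < ps.length → ps.getD i 0 ≤ ps.getD j 0 := by
    intro i j hij hj
    rcases Nat.eq_or_lt_of_le hij with rfl | hlt
    · exact le_rfl
    · rw [List.getD_eq_getElem _ _ (by omega), List.getD_eq_getElem _ _ hj]
      exact le_of_lt ((List.pairwise_iff_getElem.mp hsorted) i j (by omega) hj hlt)
  have hspec := pvFalAux_spec ps lo hs (ps.length) 0 (PySem.List.len ps)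
    (by simp [pysem]) le_rfl (by simp [pysem]) (by simp [pysem])
    (fun i hi' => ⟨fun h => absurd h (by omega), fun h => by
      simp only [PySem.List.len_eq] at h; omega⟩)
  obtain ⟨hr0, hrlen, hbound⟩ := hspec
  set r := pyFirstAtLeast ps lo with hrdef
  have hrfal : pyFirstAtLeastAux ps lo 0 (PySem.List.len ps) = r := rfl
  rw [hrfal] at hr0 hrlen hbound
  constructor
  · rintro ⟨hlt, hle⟩
    simp only [PySem.List.len_eq] at hlt
    have hget : PySem.List.pyGetD ps r 0 = ps.getD r.toNat 0 := by
      rw [PySem.List.pyGetD_eq_getElem ps 0 hr0 (by omega), List.getD_eq_getElem _ _ (by omega)]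
    refine ⟨ps.getD r.toNat 0, ?_, ?_, ?_⟩
    · rw [List.getD_eq_getElem _ _ (by omega)]; exact List.getElem_mem _
    · exact (hbound r.toNat (by omega)).2 (by omega)
    · rw [hget] at hle; exact hle
  · rintro ⟨p, hpmem, hplo, hphi⟩
    obtain ⟨i, hi', rfl⟩ := List.getElem_of_mem hpmem
    have hilt : ¬ ((i : Int) < r) := by
      intro hlt
      have := (hbound i hi').1 hlt
      rw [List.getD_eq_getElem _ _ hi'] at this
      omega
    have hjlt : r < (ps.length : Int) := by omega
    constructor
    · simpa [pysem] using hjlt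
    · have hle : ps.getD r.toNat 0 ≤ ps.getD i 0 := hs r.toNat i (by omega) hi'
      rw [List.getD_eq_getElem _ _ hi'] at hle
      have hget : PySem.List.pyGetD ps r 0 = ps.getD r.toNat 0 := by
        rw [PySem.List.pyGetD_eq_getElem ps 0 hr0 (by omega), List.getD_eq_getElem _ _ (by omega)]
      rw [hget]
      omega

theorem pvPos_append_le (ws : List (List Char)) (w : List Char) (i : Nat)
    (h : i ≤ ws.length) : pvPos (ws ++ [w]) i = pvPos ws i := by
  unfold pvPos
  rw [List.take_append_of_le_length h]

theorem pvPos_append_last (ws : List (List Char)) (w : List Char) (n : Nat)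
    (h : ws.length ≤ n) :
    pvPos (ws ++ [w]) (n + 1) = pvPos ws n + (w.length + 1) := by
  unfold pvPos
  rw [List.take_of_length_le (by simp; omega), List.take_of_length_le (by omega)]
  simp

theorem pvPosPair (words : List String) :
    (words.foldl
      (fun (st : List Int × Int) w =>
        (st.1 ++ [st.2 + PySem.Str.len w + 1], st.2 + PySem.Str.len w + 1)) ([0], 0))
    = ((List.range (words.length + 1)).map
        (fun i => (pvPos (words.map String.toList) i : Int)),
       (pvPos (words.map String.toList) words.length : Int)) := by
  induction words using List.reverseRecOn with
  | nil => simp [pvPos]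
  | append_singleton ws w ih =>
    rw [List.foldl_append, ih, List.foldl_cons, List.foldl_nil]
    dsimp only
    have hcast : PySem.Str.len w = (w.toList.length : Int) := by simp [pysem]
    have hmap : (ws ++ [w]).map String.toList = ws.map String.toList ++ [w.toList] := by simp
    rw [Prod.mk.injEq]
    refine ⟨?_, ?_⟩
    · rw [show (ws ++ [w]).length = ws.length + 1 by simp]
      conv_rhs => rw [List.range_succ]
      rw [List.map_append]
      congr 1
      · apply List.map_congr_left
        intro i hi
        rw [List.mem_range] at hi
        rw [hmap, pvPos_append_le _ _ _ (by simp; omega)]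
      · simp only [List.map_cons, List.map_nil]
        congr 1
        rw [hmap, pvPos_append_last _ _ ws.length (by simp), hcast]
        push_cast
        ring
    · rw [show (ws ++ [w]).length = ws.length + 1 by simp]
      rw [hmap, pvPos_append_last _ _ ws.length (by simp), hcast]
      push_cast
      ring

theorem pvPosList (words : List String) :
    (words.foldl
      (fun (st : List Int × Int) w =>
        (st.1 ++ [st.2 + PySem.Str.len w + 1], st.2 + PySem.Str.len w + 1)) ([0], 0)).1
    = (List.range (words.length + 1)).map
        (fun i => (pvPos (words.map String.toList) i : Int)) := by
  rw [pvPosPair]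

-- per-token core: A's substring test on the window equals an occurrence-list test
theorem pvToken_eq (words : List String) (t : String) (loN hiN : Nat)
    (hlohi : loN ≤ hiN)
    (hhi : hiN ≤ (PySem.Str.lower (PySem.Str.join " " words)).toList.length)
    (wstr : String)
    (hwin : wstr.toList
      = ((PySem.Str.lower (PySem.Str.join " " words)).toList.drop loN).take (hiN - loN)) :
    PySem.Str.isIn t wstr
      = decide (∃ p ∈ pyOccLoop (PySem.Str.lower (PySem.Str.join " " words)) t 0,
          (loN : Int) ≤ p ∧ p + (t.toList.length : Int) ≤ (hiN : Int)) := by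
  set full := PySem.Str.lower (PySem.Str.join " " words) with hfull
  rw [Bool.eq_iff_iff]
  rw [decide_eq_true_eq]
  rw [show PySem.Str.isIn t wstr = PySem.Chars.isIn t.toList wstr.toList by
    simp [PySem.Str.isIn_eq]]
  rw [PySem.Chars.isIn_iff_infix, hwin, pvInfix_seg]
  constructor
  · rintro ⟨pN, h1, h2, h3⟩
    refine ⟨(pN : Int), ?_, by exact_mod_cast h1, by omega⟩
    rw [pvOcc_mem]
    have hlen := h3.length_le
    rw [List.length_drop] at hlen
    exact ⟨by positivity, by omega, by simpa using h3⟩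
  · rintro ⟨p, hmem, h1, h2⟩
    rw [pvOcc_mem] at hmem
    obtain ⟨h0, hlen, hpre⟩ := hmem
    exact ⟨p.toNat, by omega, by omega, hpre⟩

-- per-token equivalence in the exact shape of B's window check
theorem pvCond_eq (words : List String) (t : String) (loN hiN : Nat)
    (hlohi : loN ≤ hiN)
    (hhi : hiN ≤ (PySem.Str.lower (PySem.Str.join " " words)).toList.length)
    (wstr : String)
    (hwin : wstr.toList
      = ((PySem.Str.lower (PySem.Str.join " " words)).toList.drop loN).take (hiN - loN)) :
    (PySem.Str.isIn t wstr = true)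
      ↔ (pyFirstAtLeast (pyOccLoop (PySem.Str.lower (PySem.Str.join " " words)) t 0) (loN : Int)
            < PySem.List.len (pyOccLoop (PySem.Str.lower (PySem.Str.join " " words)) t 0) ∧
          PySem.List.pyGetD (pyOccLoop (PySem.Str.lower (PySem.Str.join " " words)) t 0)
              (pyFirstAtLeast (pyOccLoop (PySem.Str.lower (PySem.Str.join " " words)) t 0) (loN : Int)) 0
            + PySem.Str.len t ≤ (hiN : Int)) := by
  rw [pvToken_eq words t loN hiN hlohi hhi wstr hwin, decide_eq_true_eq]
  rw [show PySem.Str.len t = (t.toList.length : Int) by simp [pysem]]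
  exact (pvPresence _ _ _ _ (pvOcc_sorted _ t)).symm

-- same, stated against the raw Int bound expressions of B's loop
theorem pvCond_eq' (words : List String) (t : String) (lo hi : Int) (loN hiN : Nat)
    (hlo : lo = (loN : Int)) (hhi2 : hi = (hiN : Int))
    (hlohi : loN ≤ hiN)
    (hhi : hiN ≤ (PySem.Str.lower (PySem.Str.join " " words)).toList.length)
    (wstr : String)
    (hwin : wstr.toList
      = ((PySem.Str.lower (PySem.Str.join " " words)).toList.drop loN).take (hiN - loN)) :
    (PySem.Str.isIn t wstr = true)
      ↔ (decide (pyFirstAtLeast (pyOccLoop (PySem.Str.lower (PySem.Str.join " " words)) t 0) lo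
            < PySem.List.len (pyOccLoop (PySem.Str.lower (PySem.Str.join " " words)) t 0) ∧
          PySem.List.pyGetD (pyOccLoop (PySem.Str.lower (PySem.Str.join " " words)) t 0)
              (pyFirstAtLeast (pyOccLoop (PySem.Str.lower (PySem.Str.join " " words)) t 0) lo) 0
            + PySem.Str.len t ≤ hi) = true) := by
  subst hlo
  subst hhi2
  rw [decide_eq_true_eq]
  exact pvCond_eq words t loN hiN hlohi hhi wstr hwin

-- the common first-argmax fold, abstracted over the per-window score
theorem pvFold_eq (l : List Int) (cA cB : Int → Int) (hc : ∀ s ∈ l, cA s = cB s) :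
    l.foldl (fun (st : Int × Int) s => if cA s > st.2 then (s, cA s) else st) ((0 : Int), (0 : Int))
      = l.foldl (fun (st : Int × Int) s => if cB s > st.2 then (s, cB s) else st) ((0 : Int), (0 : Int)) := by
  apply PySem.List.foldl_congr_mem
  intro acc x hx
  rw [hc x hx]

-- Chars.lower is a per-char map, so it commutes with drop/take
theorem pvLower_seg (x : List Char) (a b : Nat) :
    PySem.Chars.lower ((x.drop a).take b) = ((PySem.Chars.lower x).drop a).take b := by
  show ((x.drop a).take b).map PySem.Chars.lowerChar = _
  rw [List.map_take, List.map_drop]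
  rfl

set_option maxHeartbeats 2000000 in
theorem pvWhole (toks words : List String) (W : Int) (full : String) (pos : List Int)
    (items : List (List Int × Int))
    (hW0 : 0 ≤ W) (hWlen : W ≤ (words.length : Int))
    (hWpos : words ≠ [] → 1 ≤ W) (hWnil : words = [] → W = 0)
    (hfull : full = PySem.Str.lower (PySem.Str.join " " words))
    (hpos : pos = (List.range (words.length + 1)).map
        (fun i => (pvPos (words.map String.toList) i : Int)))
    (hitems : items = toks.map (fun t => (pyOccLoop full t 0, PySem.Str.len t))) :
    PySem.Str.strip (PySem.Str.join " " (PySem.List.slice words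
      (some (((PySem.List.pyRange 0 (max 1 ((words.length : Int) - W + 1)) 1).foldl
        (fun (st : Int × Int) start =>
          if (toks.map (fun t => if PySem.Str.isIn t (PySem.Str.lower (PySem.Str.join " " (PySem.List.slice words (some start) (some (start + W))))) then (1 : Int) else 0)).sum > st.2
          then (start, (toks.map (fun t => if PySem.Str.isIn t (PySem.Str.lower (PySem.Str.join " " (PySem.List.slice words (some start) (some (start + W))))) then (1 : Int) else 0)).sum)
          else st) ((0 : Int), (0 : Int))).1))
      (some ((((PySem.List.pyRange 0 (max 1 ((words.length : Int) - W + 1)) 1).foldl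
        (fun (st : Int × Int) start =>
          if (toks.map (fun t => if PySem.Str.isIn t (PySem.Str.lower (PySem.Str.join " " (PySem.List.slice words (some start) (some (start + W))))) then (1 : Int) else 0)).sum > st.2
          then (start, (toks.map (fun t => if PySem.Str.isIn t (PySem.Str.lower (PySem.Str.join " " (PySem.List.slice words (some start) (some (start + W))))) then (1 : Int) else 0)).sum)
          else st) ((0 : Int), (0 : Int))).1) + W))))
    = PySem.Str.strip (PySem.Str.join " " (PySem.List.slice words
      (some (((PySem.List.pyRange 0 (max 1 ((words.length : Int) - W + 1)) 1).foldl
        (fun (st : Int × Int) s =>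
          if items.foldl (fun (c : Int) pr => if pyFirstAtLeast pr.1 (PySem.List.pyGetD pos s 0) < PySem.List.len pr.1 ∧ PySem.List.pyGetD pr.1 (pyFirstAtLeast pr.1 (PySem.List.pyGetD pos s 0)) 0 + pr.2 ≤ (if W ≠ 0 then PySem.List.pyGetD pos (s + W) 0 - 1 else PySem.List.pyGetD pos s 0) then c + 1 else c) 0 > st.2
          then (s, items.foldl (fun (c : Int) pr => if pyFirstAtLeast pr.1 (PySem.List.pyGetD pos s 0) < PySem.List.len pr.1 ∧ PySem.List.pyGetD pr.1 (pyFirstAtLeast pr.1 (PySem.List.pyGetD pos s 0)) 0 + pr.2 ≤ (if W ≠ 0 then PySem.List.pyGetD pos (s + W) 0 - 1 else PySem.List.pyGetD pos s 0) then c + 1 else c) 0)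
          else st) ((0 : Int), (0 : Int))).1))
      (some ((((PySem.List.pyRange 0 (max 1 ((words.length : Int) - W + 1)) 1).foldl
        (fun (st : Int × Int) s =>
          if items.foldl (fun (c : Int) pr => if pyFirstAtLeast pr.1 (PySem.List.pyGetD pos s 0) < PySem.List.len pr.1 ∧ PySem.List.pyGetD pr.1 (pyFirstAtLeast pr.1 (PySem.List.pyGetD pos s 0)) 0 + pr.2 ≤ (if W ≠ 0 then PySem.List.pyGetD pos (s + W) 0 - 1 else PySem.List.pyGetD pos s 0) then c + 1 else c) 0 > st.2
          then (s, items.foldl (fun (c : Int) pr => if pyFirstAtLeast pr.1 (PySem.List.pyGetD pos s 0) < PySem.List.len pr.1 ∧ PySem.List.pyGetD pr.1 (pyFirstAtLeast pr.1 (PySem.List.pyGetD pos s 0)) 0 + pr.2 ≤ (if W ≠ 0 then PySem.List.pyGetD pos (s + W) 0 - 1 else PySem.List.pyGetD pos s 0) then c + 1 else c) 0)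
          else st) ((0 : Int), (0 : Int))).1) + W)))) := by
  subst hfull
  subst hitems
  refine congrArg (fun z : Int × Int => PySem.Str.strip (PySem.Str.join " "
      (PySem.List.slice words (some z.1) (some (z.1 + W)))))
    (pvFold_eq (PySem.List.pyRange 0 (max 1 ((words.length : Int) - W + 1)) 1)
      (fun start => (toks.map (fun t => if PySem.Str.isIn t (PySem.Str.lower (PySem.Str.join " " (PySem.List.slice words (some start) (some (start + W))))) then (1 : Int) else 0)).sum)
      (fun s => (toks.map (fun t => (pyOccLoop (PySem.Str.lower (PySem.Str.join " " words)) t 0, PySem.Str.len t))).foldl (fun (c : Int) pr => if pyFirstAtLeast pr.1 (PySem.List.pyGetD pos s 0) < PySem.List.len pr.1 ∧ PySem.List.pyGetD pr.1 (pyFirstAtLeast pr.1 (PySem.List.pyGetD pos s 0)) 0 + pr.2 ≤ (if W ≠ 0 then PySem.List.pyGetD pos (s + W) 0 - 1 else PySem.List.pyGetD pos s 0) then c + 1 else c) 0)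
      ?_)
  intro s hs
  dsimp only
  rw [PySem.List.mem_pyRange_one] at hs
  rw [PySem.List.foldl_ite_add_one, PySem.List.sum_map_ite_one_zero, zero_add, List.countP_map]
  refine congrArg (fun n : Nat => (n : Int)) (List.countP_congr ?_)
  intro t ht
  simp only [Function.comp_apply]
  have hloE : PySem.List.pyGetD pos s 0
      = ((pvPos (words.map String.toList) s.toNat : Nat) : Int) := by
    rw [hpos, PySem.List.pyGetD_eq_getElem _ 0 hs.1 (by simp; omega)]
    rw [List.getElem_map, List.getElem_range]
  by_cases hwnil : words = []
  · subst hwnil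
    have hW : W = 0 := hWnil rfl
    subst hW
    have hs0 : s = 0 := by simp at hs; omega
    subst hs0
    have hhiE : (if (0 : Int) ≠ 0 then PySem.List.pyGetD pos (0 + 0) 0 - 1 else PySem.List.pyGetD pos 0 0)
        = ((pvPos (([] : List String).map String.toList) (0 : Int).toNat : Nat) : Int) := by
      rw [if_neg (by simp), hloE]
    exact pvCond_eq' [] t _ _ _ _ hloE hhiE le_rfl (by simp [pvPos])
      _ (by simp [pysem, pvPos]; rfl)
  · have hW1 : 1 ≤ W := hWpos hwnil
    have hlen1 : 0 < words.length := List.length_pos_iff.mpr hwnil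
    have hsn : s.toNat + W.toNat ≤ words.length := by omega
    have hwlen : (words.map String.toList).length = words.length := by simp
    have hhiE : (if W ≠ 0 then PySem.List.pyGetD pos (s + W) 0 - 1 else PySem.List.pyGetD pos s 0)
        = ((pvPos (words.map String.toList) (s.toNat + W.toNat) - 1 : Nat) : Int) := by
      rw [if_pos (by omega)]
      rw [hpos, PySem.List.pyGetD_eq_getElem _ 0 (by omega) (by simp; omega)]
      rw [List.getElem_map, List.getElem_range]
      rw [show (s + W).toNat = s.toNat + W.toNat by omega]
      have := le_pvPos' (words.map String.toList) (s.toNat + W.toNat) (by omega)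
      omega
    have hlt := pvPos_lt_add (words.map String.toList) s.toNat W.toNat (by omega) (by omega)
    have hmono := pvPos_mono (words.map String.toList)
      (show s.toNat + W.toNat ≤ (words.map String.toList).length by omega)
    have hlenfull : (PySem.Str.lower (PySem.Str.join " " words)).toList.length
        = pvPos (words.map String.toList) (words.map String.toList).length - 1 := by
      rw [show (PySem.Str.lower (PySem.Str.join " " words)).toList
            = PySem.Chars.lower (PySem.Chars.join [' '] (words.map String.toList)) by
          simp [pysem, show (" " : String).toList = [' '] from rfl]]
      rw [show PySem.Chars.lower (PySem.Chars.join [' '] (words.map String.toList))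
            = (PySem.Chars.join [' '] (words.map String.toList)).map PySem.Chars.lowerChar from rfl]
      rw [List.length_map]
      exact pvJoin_length _ (by simp [hwnil])
    apply pvCond_eq' words t _ _ (pvPos (words.map String.toList) s.toNat)
      (pvPos (words.map String.toList) (s.toNat + W.toNat) - 1)
      hloE hhiE (by omega) (by omega)
    -- hwin
    have hslice : PySem.List.slice words (some s) (some (s + W))
        = (words.drop s.toNat).take W.toNat := by
      rw [PySem.List.slice_toNat words hs.1 (by omega)]
      congr 1
      omega
    rw [hslice]
    rw [show (PySem.Str.lower (PySem.Str.join " " ((words.drop s.toNat).take W.toNat))).toList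
          = PySem.Chars.lower (PySem.Chars.join [' '] (((words.drop s.toNat).take W.toNat).map String.toList)) by
        simp [pysem, show (" " : String).toList = [' '] from rfl]]
    rw [show (PySem.Str.lower (PySem.Str.join " " words)).toList
          = PySem.Chars.lower (PySem.Chars.join [' '] (words.map String.toList)) by
        simp [pysem, show (" " : String).toList = [' '] from rfl]]
    rw [List.map_take, List.map_drop]
    rw [pvJoin_seg (words.map String.toList) s.toNat W.toNat (by omega) (by omega)]
    rw [pvLower_seg]

-- ===== VERDICT (by name: the statement is the Claim_ definition above) =====
theorem find_best_window_py_spec : Claim_equal_find_best_window_py := by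
  intro query testimony overlap_tokens _
  simp only [Spec_find_best_window_py, find_best_window_py, find_best_window_py_alt]
  by_cases h : overlap_tokens.isEmpty = true
  · rw [if_pos h, if_pos h]
  · rw [if_neg h, if_neg h]
    exact pvWhole overlap_tokens (PySem.Str.split₀ testimony)
      (min (((PySem.Str.split₀ query).length : Int) + 5) ((PySem.Str.split₀ testimony).length : Int))
      (PySem.Str.lower (PySem.Str.join " " (PySem.Str.split₀ testimony)))
      ((PySem.Str.split₀ testimony).foldl
        (fun (st : List Int × Int) w =>
          (st.1 ++ [st.2 + PySem.Str.len w + 1], st.2 + PySem.Str.len w + 1)) ([0], 0)).1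
      ((overlap_tokens).foldl
        (fun acc t => acc ++ [(pyOccLoop (PySem.Str.lower (PySem.Str.join " " (PySem.Str.split₀ testimony))) t 0, PySem.Str.len t)]) [])
      (by have := Int.natCast_nonneg (PySem.Str.split₀ query).length
          have := Int.natCast_nonneg (PySem.Str.split₀ testimony).length
          omega)
      (by omega)
      (by intro hne
          have hl : 0 < (PySem.Str.split₀ testimony).length := List.length_pos_iff.mpr hne
          have := Int.natCast_nonneg (PySem.Str.split₀ query).length
          omega)
      (by intro hnil
          rw [hnil]
          simp
          omega)
      rfl
      (pvPosList (PySem.Str.split₀ testimony))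
      (by rw [PySem.List.foldl_append_singleton_eq_map]; rfl)
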